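-- pv_equiv track=rewrite | github.com/CodingThrust/problem-reductions | docs/paper/verify-reductions/adversary_three_partition_dynamic_storage_allocation.py | adv_solve_three_partition
-- ===== SOURCE A (Python) =====
-- from typing import Optional
--
-- def adv_solve_three_partition(sizes: list[int], bound: int) -> Optional[list[int]]:
--     """Brute-force 3-Partition solver."""
--     n = len(sizes)
--     m = n // 3
--
--     def bt(idx, counts, sums):
--         if idx == n:
--             return [] if all(c == 3 and s == bound for c, s in zip(counts, sums)) else None
--         for g in range(m):
--             if counts[g] >= 3:
--                 continue
--             if sums[g] + sizes[idx] > bound: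
--                 continue
--             counts[g] += 1
--             sums[g] += sizes[idx]
--             r = bt(idx + 1, counts, sums)
--             if r is not None:
--                 return [g] + r
--             counts[g] -= 1
--             sums[g] -= sizes[idx]
--             if counts[g] == 0:
--                 break
--         return None
--
--     return bt(0, [0] * m, [0] * m)
-- ===== SOURCE B (Python) =====
-- from typing import Optional
--
-- def adv_solve_three_partition(sizes: list[int], bound: int) -> Optional[list[int]]:
--     """Brute-force 3-Partition solver, rewritten as an explicit-stack (iterative) DFS."""
--     n = len(sizes)
--     m = n // 3
--     counts = [0] * m
--     sums = [0] * m
--     cursor = 0   # next group to try at the current depth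
--     trail = []   # (group chosen for item i, cursor to resume with after backtracking), i = 0..depth-1
--     while True:
--         idx = len(trail)
--         if idx == n:
--             if all(c == 3 and s == bound for c, s in zip(counts, sums)):
--                 return [g for g, _ in trail]
--             g = m                     # force a backtrack
--         else:
--             g = cursor
--             while g < m and (counts[g] >= 3 or sums[g] + sizes[idx] > bound):
--                 g += 1
--         if g < m:                     # descend: assign item idx to group g
--             counts[g] += 1
--             sums[g] += sizes[idx]
--             trail.append((g, g + 1))
--             cursor = 0
--         else:                         # this level exhausted: backtrack one step
--             if not trail:
--                 return None
--             pg, cursor = trail.pop()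
--             counts[pg] -= 1
--             sums[pg] -= sizes[len(trail)]
--             if counts[pg] == 0:
--                 cursor = m            # empty-group symmetry break, as in the recursion
-- ===== Notes on version B (the rewrite author's own statement) =====
-- stated objective: alternative
-- what changed: The nested recursive backtracker bt is rewritten as an iterative explicit-stack DFS: a while-loop over a trail of (chosen group, saved cursor) frames with shared counts/sums arrays, reproducing the exact trial order and the empty-group symmetry break by setting the popped level's cursor to m.
import Mathlib
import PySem

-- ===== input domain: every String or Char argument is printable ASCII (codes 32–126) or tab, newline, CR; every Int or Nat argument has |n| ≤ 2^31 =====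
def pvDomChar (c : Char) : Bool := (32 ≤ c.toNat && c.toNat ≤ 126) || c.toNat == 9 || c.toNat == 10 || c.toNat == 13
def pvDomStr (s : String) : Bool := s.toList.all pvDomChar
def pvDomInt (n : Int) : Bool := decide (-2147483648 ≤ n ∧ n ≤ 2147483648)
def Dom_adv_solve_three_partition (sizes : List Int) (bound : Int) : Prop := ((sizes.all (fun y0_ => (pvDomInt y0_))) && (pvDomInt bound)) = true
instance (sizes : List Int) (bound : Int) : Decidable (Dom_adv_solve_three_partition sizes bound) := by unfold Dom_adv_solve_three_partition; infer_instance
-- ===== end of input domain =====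

-- B re-implements A's recursive backtracking as an explicit-stack (iterative) DFS with the
-- same trial order and the same empty-group symmetry break; same asymptotic cost ("alternative").

-- ===== PORT A =====
-- inner `for g in range(m)` loop of bt: `continue` = recurse at g+1; `break` = return none.
-- The functional undo of `counts[g] -= 1; sums[g] -= sizes[idx]` is implicit (the original
-- counts/sums are still in scope), so `counts[g] == 0` after the undo is `counts.getD g 0 == 0`.
def pvLoopA (bound : Int) (m : Nat) (x : Int)
    (descend : List Int → List Int → Option (List Int))
    (counts sums : List Int) (g : Nat) : Option (List Int) :=
  if _h : g < m then
    if 3 ≤ counts.getD g 0 then pvLoopA bound m x descend counts sums (g+1)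
    else if bound < sums.getD g 0 + x then pvLoopA bound m x descend counts sums (g+1)
    else
      match descend (counts.set g (counts.getD g 0 + 1)) (sums.set g (sums.getD g 0 + x)) with
      | some r => some ((g : Int) :: r)
      | none =>
        if counts.getD g 0 == 0 then none
        else pvLoopA bound m x descend counts sums (g+1)
  else none
termination_by m - g
decreasing_by all_goals omega

-- bt, recursing on the suffix of sizes still to place (sizes[idx:]); idx == n ↔ the suffix is [].
def pvBtA (bound : Int) (m : Nat) : List Int → List Int → List Int → Option (List Int)
  | [], counts, sums =>
      if (counts.zip sums).all (fun p => p.1 == 3 && p.2 == bound) then some [] else none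
  | x :: rest, counts, sums => pvLoopA bound m x (pvBtA bound m rest) counts sums 0

def adv_solve_three_partition (sizes : List Int) (bound : Int) : Option (List Int) :=
  pvBtA bound (sizes.length / 3) sizes
    (List.replicate (sizes.length / 3) 0) (List.replicate (sizes.length / 3) 0)

-- ===== PORT B =====
-- the inner `while g < m and (counts[g] >= 3 or sums[g] + sizes[idx] > bound): g += 1`
def pvSkipB (counts sums : List Int) (x bound : Int) (m : Nat) (g : Nat) : Nat :=
  if _h : g < m then
    if 3 ≤ counts.getD g 0 ∨ bound < sums.getD g 0 + x then pvSkipB counts sums x bound m (g+1)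
    else g
  else g
termination_by m - g
decreasing_by all_goals omega

-- the backtracking step: pop a frame, undo the assignment, apply the empty-group break;
-- `none` = the stack is empty (Python's `return None`).
def pvPopB (sizes : List Int) (m : Nat) (trail : List (Nat × Nat)) (counts sums : List Int) :
    Option (Nat × List (Nat × Nat) × List Int × List Int) :=
  match trail with
  | [] => none
  | (pg, sc) :: tr =>
    some (if (counts.set pg (counts.getD pg 0 - 1)).getD pg 0 == 0 then m else sc,
          tr,
          counts.set pg (counts.getD pg 0 - 1),
          sums.set pg (sums.getD pg 0 - sizes.getD tr.length 0))

-- the `while True` loop; `trail` holds (chosen group, saved cursor) frames, newest first.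
-- `fuel` only makes the loop total; the initial fuel (m+2)^(n+1) is proved sufficient below.
def pvGoB (sizes : List Int) (bound : Int) (n m : Nat) :
    Nat → Nat → List (Nat × Nat) → List Int → List Int → Option (List Int)
  | 0, _, _, _, _ => none
  | fuel+1, cursor, trail, counts, sums =>
    if trail.length = n ∧ ((counts.zip sums).all (fun p => p.1 == 3 && p.2 == bound)) = true then
      some ((trail.map (fun p => ((p.1 : Int)))).reverse)
    else
      let g := if trail.length = n then m
               else pvSkipB counts sums (sizes.getD trail.length 0) bound m cursor
      if g < m then
        pvGoB sizes bound n m fuel 0 ((g, g+1) :: trail)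
          (counts.set g (counts.getD g 0 + 1))
          (sums.set g (sums.getD g 0 + sizes.getD trail.length 0))
      else
        match pvPopB sizes m trail counts sums with
        | none => none
        | some (c', tr', counts', sums') => pvGoB sizes bound n m fuel c' tr' counts' sums'

def adv_solve_three_partition_alt (sizes : List Int) (bound : Int) : Option (List Int) :=
  pvGoB sizes bound sizes.length (sizes.length / 3)
    ((sizes.length / 3 + 2) ^ (sizes.length + 1)) 0 []
    (List.replicate (sizes.length / 3) 0) (List.replicate (sizes.length / 3) 0)

-- ===== PRECONDITION & SPEC =====
def Spec_adv_solve_three_partition (sizes : List Int) (bound : Int) (out : Option (List Int)) : Prop := out = adv_solve_three_partition_alt sizes bound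
instance (sizes : List Int) (bound : Int) (out : Option (List Int)) : Decidable (Spec_adv_solve_three_partition sizes bound out) := by unfold Spec_adv_solve_three_partition; infer_instance

-- ===== CLAIM (what is proved, stated in full; the proofs are below) =====
def Claim_equal_adv_solve_three_partition : Prop := ∀ (sizes : List Int) (bound : Int), Dom_adv_solve_three_partition sizes bound → Spec_adv_solve_three_partition sizes bound (adv_solve_three_partition sizes bound)

-- ===== LEMMAS AND PROOFS =====

-- what the recursion computes at depth idx, starting the group loop at cursor c
def pvLevel (sizes : List Int) (bound : Int) (n m idx c : Nat) (counts sums : List Int) :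
    Option (List Int) :=
  if idx = n then
    (if (counts.zip sums).all (fun p => p.1 == 3 && p.2 == bound) then some [] else none)
  else pvLoopA bound m (sizes.getD idx 0) (pvBtA bound m (sizes.drop (idx+1))) counts sums c

def pvPathOf (trail : List (Nat × Nat)) : List Int :=
  (trail.map (fun p => ((p.1 : Int)))).reverse

-- what the recursion would return from a machine state: run the current level from cursor c;
-- on failure pop a frame (undo + empty-group symmetry break) and continue one level up.
def pvResume (sizes : List Int) (bound : Int) (n m : Nat) :
    List (Nat × Nat) → Nat → List Int → List Int → Option (List Int)
  | [], c, counts, sums =>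
      match pvLevel sizes bound n m 0 c counts sums with
      | some res => some res
      | none => none
  | (pg, sc) :: tr, c, counts, sums =>
      match pvLevel sizes bound n m (tr.length + 1) c counts sums with
      | some res => some (pvPathOf ((pg, sc) :: tr) ++ res)
      | none =>
        pvResume sizes bound n m tr
          (if (counts.set pg (counts.getD pg 0 - 1)).getD pg 0 == 0 then m else sc)
          (counts.set pg (counts.getD pg 0 - 1))
          (sums.set pg (sums.getD pg 0 - sizes.getD tr.length 0))

lemma pvResume_step (sizes : List Int) (bound : Int) (n m : Nat)
    (trail : List (Nat × Nat)) (c : Nat) (counts sums : List Int) :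
    pvResume sizes bound n m trail c counts sums
      = match pvLevel sizes bound n m trail.length c counts sums with
        | some res => some (pvPathOf trail ++ res)
        | none =>
          match trail with
          | [] => none
          | (pg, sc) :: tr =>
            pvResume sizes bound n m tr
              (if (counts.set pg (counts.getD pg 0 - 1)).getD pg 0 == 0 then m else sc)
              (counts.set pg (counts.getD pg 0 - 1))
              (sums.set pg (sums.getD pg 0 - sizes.getD tr.length 0)) := by
  cases trail with
  | nil =>
      simp only [pvResume, List.length_nil]
      cases pvLevel sizes bound n m 0 c counts sums <;> simp [pvPathOf]
  | cons hd tl =>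
      obtain ⟨pg, sc⟩ := hd
      simp only [pvResume, List.length_cons]

-- termination measure for the machine
def pvNu (n m : Nat) : List (Nat × Nat) → Nat
  | [] => 0
  | (_, sc) :: tr => (m + 1 - sc) * (m + 2) ^ (n - tr.length) + pvNu n m tr

def pvMu (n m : Nat) (tr : List (Nat × Nat)) (c : Nat) : Nat :=
  (m + 1 - c) * (m + 2) ^ (n - tr.length) + pvNu n m tr

lemma pvMu_pos {n m : Nat} {tr : List (Nat × Nat)} {c : Nat} (hc : c ≤ m) :
    1 ≤ pvMu n m tr c := by
  have h1 : 1 ≤ m + 1 - c := by omega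
  have h2 : 1 ≤ (m + 2) ^ (n - tr.length) := Nat.one_le_pow _ _ (by omega)
  calc 1 = 1 * 1 := rfl
    _ ≤ (m + 1 - c) * (m + 2) ^ (n - tr.length) := Nat.mul_le_mul h1 h2
    _ ≤ _ := Nat.le_add_right _ _

lemma pvMu_pop {n m : Nat} {pg sc c c' : Nat} {tr : List (Nat × Nat)}
    (hc : c ≤ m) (hsc : sc ≤ m) (_hlen : tr.length + 1 ≤ n)
    (hc' : c' = sc ∨ c' = m) :
    pvMu n m tr c' < pvMu n m ((pg, sc) :: tr) c := by
  simp only [pvMu, pvNu]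
  simp only [List.length_cons]
  have hmono : (m + 1 - c') * (m + 2) ^ (n - tr.length)
      ≤ (m + 1 - sc) * (m + 2) ^ (n - tr.length) :=
    Nat.mul_le_mul_right _ (by omega)
  have hW : 1 ≤ (m + 2) ^ (n - (tr.length + 1)) := Nat.one_le_pow _ _ (by omega)
  have hpos : 1 ≤ (m + 1 - c) * (m + 2) ^ (n - (tr.length + 1)) := by
    have := Nat.mul_le_mul (show 1 ≤ m + 1 - c by omega) hW
    simpa using this
  omega

lemma pvMu_push {n m : Nat} {c g : Nat} {tr : List (Nat × Nat)}
    (hc : c ≤ g) (hg : g < m) (hlen : tr.length < n) :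
    pvMu n m ((g, g+1) :: tr) 0 < pvMu n m tr c := by
  simp only [pvMu, pvNu]
  simp only [List.length_cons]
  have hexp : n - tr.length = (n - (tr.length + 1)) + 1 := by omega
  set W' : Nat := (m + 2) ^ (n - (tr.length + 1)) with hW'
  have hW1 : 1 ≤ W' := Nat.one_le_pow _ _ (by omega)
  have hpow : (m + 2) ^ (n - tr.length) = (m + 2) * W' := by
    rw [hexp, pow_succ, mul_comm]
  rw [hpow]
  have key : (m + 1 - 0) * W' + (m + 1 - (g+1)) * ((m + 2) * W') < (m + 1 - c) * ((m + 2) * W') := by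
    have h1 : m + 1 - (g+1) + 1 ≤ m + 1 - c := by omega
    calc (m + 1 - 0) * W' + (m + 1 - (g+1)) * ((m + 2) * W')
        < (m + 2) * W' + (m + 1 - (g+1)) * ((m + 2) * W') := by
          have : (m + 1 - 0) * W' < (m + 2) * W' :=
            (Nat.mul_lt_mul_right (by omega)).2 (by omega)
          omega
      _ = (m + 1 - (g+1) + 1) * ((m + 2) * W') := by ring
      _ ≤ (m + 1 - c) * ((m + 2) * W') := Nat.mul_le_mul_right _ h1
  omega

-- pvSkipB facts
lemma pvSkipB_ge (counts sums : List Int) (x bound : Int) (m : Nat) :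
    ∀ g, g ≤ pvSkipB counts sums x bound m g := by
  intro g
  induction g using pvSkipB.induct counts sums x bound m with
  | case1 g h hcond ih => rw [pvSkipB]; simp only [dif_pos h, if_pos hcond]; omega
  | case2 g h hcond => rw [pvSkipB]; simp only [dif_pos h, if_neg hcond]; omega
  | case3 g h => rw [pvSkipB]; simp only [dif_neg h]; omega

lemma pvSkipB_le (counts sums : List Int) (x bound : Int) (m : Nat) :
    ∀ g, g ≤ m → pvSkipB counts sums x bound m g ≤ m := by
  intro g
  induction g using pvSkipB.induct counts sums x bound m with
  | case1 g h hcond ih =>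
      intro _; rw [pvSkipB]; simp only [dif_pos h, if_pos hcond]; exact ih (by omega)
  | case2 g h hcond => intro hg; rw [pvSkipB]; simp only [dif_pos h, if_neg hcond]; omega
  | case3 g h => intro hg; rw [pvSkipB]; simp only [dif_neg h]; omega

lemma pvSkipB_feasible (counts sums : List Int) (x bound : Int) (m : Nat) :
    ∀ g, pvSkipB counts sums x bound m g < m →
      ¬ (3 ≤ counts.getD (pvSkipB counts sums x bound m g) 0) ∧
      ¬ (bound < sums.getD (pvSkipB counts sums x bound m g) 0 + x) := by
  intro g
  induction g using pvSkipB.induct counts sums x bound m with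
  | case1 g h hcond ih => rw [pvSkipB]; simp only [dif_pos h, if_pos hcond]; exact ih
  | case2 g h hcond =>
      rw [pvSkipB]; simp only [dif_pos h, if_neg hcond]
      intro _
      exact ⟨fun h' => hcond (Or.inl h'), fun h' => hcond (Or.inr h')⟩
  | case3 g h => intro hlt; rw [pvSkipB] at hlt; simp only [dif_neg h] at hlt; omega

lemma pvLoopA_skip (bound : Int) (m : Nat) (x : Int)
    (descend : List Int → List Int → Option (List Int)) (counts sums : List Int) :
    ∀ g, pvLoopA bound m x descend counts sums g
        = pvLoopA bound m x descend counts sums (pvSkipB counts sums x bound m g) := by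
  intro g
  induction g using pvSkipB.induct counts sums x bound m with
  | case1 g h hcond ih =>
      rw [pvSkipB]; simp only [dif_pos h, if_pos hcond]
      rw [← ih, pvLoopA]
      rcases hcond with hc | hc
      · simp only [dif_pos h, if_pos hc]
      · simp only [dif_pos h]
        by_cases h3 : 3 ≤ counts.getD g 0
        · simp only [if_pos h3]
        · simp only [if_neg h3, if_pos hc]
  | case2 g h hcond => rw [pvSkipB]; simp only [dif_pos h, if_neg hcond]
  | case3 g h => rw [pvSkipB]; simp only [dif_neg h]

lemma pvLoopA_m (bound : Int) (m : Nat) (x : Int)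
    (descend : List Int → List Int → Option (List Int)) (counts sums : List Int) :
    pvLoopA bound m x descend counts sums m = none := by
  rw [pvLoopA]; simp

-- list set/getD facts used for the functional undo
lemma pvGetD_set_self (l : List Int) (i : Nat) (v : Int) (h : i < l.length) :
    (l.set i v).getD i 0 = v := by
  rw [List.getD_eq_getElem _ _ (by simpa using h)]
  simp

lemma pvSet_getD_self (l : List Int) (i : Nat) :
    l.set i (l.getD i 0) = l := by
  by_cases h : i < l.length
  · apply List.ext_getElem (by simp)
    intro j hj hj'
    rw [List.getElem_set]
    split
    · subst_vars; rw [List.getD_eq_getElem _ _ h]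
    · rfl
  · rw [List.set_eq_of_length_le (by omega)]

lemma pvUndo (l : List Int) (i : Nat) (d : Int) :
    (l.set i (l.getD i 0 + d)).set i ((l.set i (l.getD i 0 + d)).getD i 0 - d) = l := by
  by_cases h : i < l.length
  · rw [pvGetD_set_self _ _ _ h, List.set_set]
    have : l.getD i 0 + d - d = l.getD i 0 := by ring
    rw [this]
    exact pvSet_getD_self l i
  · have h1 : l.set i (l.getD i 0 + d) = l := List.set_eq_of_length_le (by omega)
    rw [h1, List.set_eq_of_length_le (by omega)]

lemma pvPathOf_cons (g sc : Nat) (tr : List (Nat × Nat)) :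
    pvPathOf ((g, sc) :: tr) = pvPathOf tr ++ [(g : Int)] := by
  simp [pvPathOf]

-- bt at depth idx = pvLevel with cursor 0
lemma pvBtA_drop (sizes : List Int) (bound : Int) (m : Nat) :
    ∀ idx counts sums, idx ≤ sizes.length →
      pvBtA bound m (sizes.drop idx) counts sums
        = pvLevel sizes bound sizes.length m idx 0 counts sums := by
  intro idx counts sums h
  by_cases he : idx = sizes.length
  · subst he
    rw [List.drop_length]
    simp [pvBtA, pvLevel]
  · have hlt : idx < sizes.length := by omega
    rw [List.drop_eq_getElem_cons hlt]
    simp only [pvBtA, pvLevel, if_neg he]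
    rw [List.getD_eq_getElem _ _ hlt]

-- one unfold of the loop at a feasible group
lemma pvLoopA_feasible (bound : Int) (m : Nat) (x : Int)
    (descend : List Int → List Int → Option (List Int)) (counts sums : List Int) (g : Nat)
    (hg : g < m) (h3 : ¬ 3 ≤ counts.getD g 0) (hb : ¬ bound < sums.getD g 0 + x) :
    pvLoopA bound m x descend counts sums g
      = match descend (counts.set g (counts.getD g 0 + 1)) (sums.set g (sums.getD g 0 + x)) with
        | some r => some ((g : Int) :: r)
        | none =>
          if counts.getD g 0 == 0 then none
          else pvLoopA bound m x descend counts sums (g+1) := by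
  rw [pvLoopA]; simp only [dif_pos hg, if_neg h3, if_neg hb]

-- MAIN SIMULATION: with enough fuel the machine computes the resume function
lemma pvGoB_eq_resume (sizes : List Int) (bound : Int) (m : Nat) :
    ∀ fuel (trail : List (Nat × Nat)) (c : Nat) (counts sums : List Int),
      trail.length ≤ sizes.length → c ≤ m →
      (∀ p ∈ trail, p.1 < m ∧ p.2 ≤ m) →
      pvMu sizes.length m trail c ≤ fuel →
      pvGoB sizes bound sizes.length m fuel c trail counts sums
        = pvResume sizes bound sizes.length m trail c counts sums := by
  intro fuel
  induction fuel with
  | zero =>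
      intro trail c counts sums _ hc _ hmu
      have := pvMu_pos (n := sizes.length) (tr := trail) hc
      omega
  | succ fuel ih =>
      intro trail c counts sums hlen hc hmem hmu
      rw [pvResume_step]
      by_cases hn : trail.length = sizes.length
      · -- at idx = n: no descent is possible; succeed or pop
        have hlev : pvLevel sizes bound sizes.length m trail.length c counts sums
            = (if (counts.zip sums).all (fun p => p.1 == 3 && p.2 == bound) then some [] else none) := by
          simp [pvLevel, hn]
        by_cases hchk : ((counts.zip sums).all (fun p => p.1 == 3 && p.2 == bound)) = true
        · rw [pvGoB]
          simp only [if_pos (And.intro hn hchk)]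
          rw [hlev, if_pos hchk]
          simp [pvPathOf]
        · rw [pvGoB]
          simp only [hchk, if_false, if_pos hn, lt_irrefl, if_false]
          rw [hlev, if_neg hchk]
          cases trail with
          | nil => simp [pvPopB]
          | cons hd tl =>
              obtain ⟨pg, sc⟩ := hd
              have hmemh := hmem (pg, sc) (by simp)
              simp only [pvPopB]
              rw [if_neg (by simp)]
              apply ih
              · simp only [List.length_cons] at hlen; omega
              · split <;> omega
              · exact fun p hp => hmem p (by simp [hp])
              · have := pvMu_pop (n := sizes.length) (pg := pg) (sc := sc) (c := c)
                  (c' := if (counts.set pg (counts.getD pg 0 - 1)).getD pg 0 == 0 then m else sc)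
                  (tr := tl) hc hmemh.2 (by simp only [List.length_cons] at hn; omega)
                  (by split
                      · right; rfl
                      · left; rfl)
                omega
      · -- idx < n
        have hidx : trail.length < sizes.length := by omega
        have hge : c ≤ pvSkipB counts sums (sizes.getD trail.length 0) bound m c :=
          pvSkipB_ge counts sums _ bound m c
        have hle : pvSkipB counts sums (sizes.getD trail.length 0) bound m c ≤ m :=
          pvSkipB_le counts sums _ bound m c hc
        have hlev : pvLevel sizes bound sizes.length m trail.length c counts sums
            = pvLoopA bound m (sizes.getD trail.length 0)
                (pvBtA bound m (sizes.drop (trail.length+1))) counts sums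
                (pvSkipB counts sums (sizes.getD trail.length 0) bound m c) := by
          simp only [pvLevel, if_neg hn]
          exact pvLoopA_skip bound m _ _ counts sums c
        rw [pvGoB]
        simp only [hn, false_and, if_false]
        set g := pvSkipB counts sums (sizes.getD trail.length 0) bound m c with hgdef
        by_cases hgm : g < m
        · -- push
          obtain ⟨h3, hb⟩ := pvSkipB_feasible counts sums (sizes.getD trail.length 0) bound m c hgm
          rw [if_pos hgm]
          rw [ih _ _ _ _ (by simp only [List.length_cons]; omega) (by omega)
            (by
              intro p hp
              simp only [List.mem_cons] at hp
              rcases hp with hp | hp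
              · subst hp; constructor <;> [omega; omega]
              · exact hmem p hp)
            (by
              have := pvMu_push (n := sizes.length) (c := c) (g := g) (tr := trail) hge hgm hidx
              omega)]
          rw [pvResume_step]
          simp only [List.length_cons]
          -- level result one deeper, with the updated counts/sums, is exactly the descend call
          have hbt : pvBtA bound m (sizes.drop (trail.length + 1))
                (counts.set g (counts.getD g 0 + 1))
                (sums.set g (sums.getD g 0 + sizes.getD trail.length 0))
              = pvLevel sizes bound sizes.length m (trail.length + 1) 0
                (counts.set g (counts.getD g 0 + 1))
                (sums.set g (sums.getD g 0 + sizes.getD trail.length 0)) :=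
            pvBtA_drop sizes bound m (trail.length + 1) _ _ (by omega)
          rw [hlev, pvLoopA_feasible bound m _ _ counts sums g hgm h3 hb, hbt]
          -- undo identities
          have hundoC : (counts.set g (counts.getD g 0 + 1)).set g
              ((counts.set g (counts.getD g 0 + 1)).getD g 0 - 1) = counts := pvUndo counts g 1
          have hundoS : (sums.set g (sums.getD g 0 + sizes.getD trail.length 0)).set g
              ((sums.set g (sums.getD g 0 + sizes.getD trail.length 0)).getD g 0
                - sizes.getD trail.length 0) = sums :=
            pvUndo sums g (sizes.getD trail.length 0)
          cases hres : pvLevel sizes bound sizes.length m (trail.length + 1) 0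
              (counts.set g (counts.getD g 0 + 1))
              (sums.set g (sums.getD g 0 + sizes.getD trail.length 0)) with
          | some res => simp [pvPathOf_cons]
          | none =>
            simp only []
            rw [hundoC, hundoS]
            by_cases hz : (counts.getD g 0 == 0) = true
            · simp only [if_pos hz]
              rw [pvResume_step]
              have h1 : pvLevel sizes bound sizes.length m trail.length m counts sums = none := by
                simp only [pvLevel, if_neg hn]
                exact pvLoopA_m bound m _ _ counts sums
              rw [h1]
            · simp only [if_neg hz]
              rw [pvResume_step]
              have h1 : pvLevel sizes bound sizes.length m trail.length (g+1) counts sums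
                  = pvLoopA bound m (sizes.getD trail.length 0)
                    (pvBtA bound m (sizes.drop (trail.length+1))) counts sums (g+1) := by
                simp only [pvLevel, if_neg hn]
              rw [h1]
        · -- this level is exhausted: pop
          rw [if_neg hgm]
          have hgm' : g = m := by omega
          have hlevn : pvLevel sizes bound sizes.length m trail.length c counts sums = none := by
            rw [hlev, hgm']
            exact pvLoopA_m bound m _ _ counts sums
          rw [hlevn]
          cases trail with
          | nil => simp [pvPopB]
          | cons hd tl =>
              obtain ⟨pg, sc⟩ := hd
              have hmemh := hmem (pg, sc) (by simp)
              simp only [pvPopB]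
              apply ih
              · simp only [List.length_cons] at hlen; omega
              · split <;> omega
              · exact fun p hp => hmem p (by simp [hp])
              · have := pvMu_pop (n := sizes.length) (pg := pg) (sc := sc) (c := c)
                  (c' := if (counts.set pg (counts.getD pg 0 - 1)).getD pg 0 == 0 then m else sc)
                  (tr := tl) hc hmemh.2 (by simp only [List.length_cons] at hlen hidx; omega)
                  (by split
                      · right; rfl
                      · left; rfl)
                omega

-- fuel bound for the initial state
lemma pvFuel_init (n m : Nat) : pvMu n m [] 0 ≤ (m + 2) ^ (n + 1) := by
  unfold pvMu pvNu
  simp only [List.length_nil, Nat.sub_zero, Nat.add_zero]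
  calc (m + 1 - 0) * (m + 2) ^ n ≤ (m + 2) * (m + 2) ^ n :=
        Nat.mul_le_mul_right _ (by omega)
    _ = (m + 2) ^ (n + 1) := by rw [pow_succ, mul_comm]

-- ===== VERDICT (by name: the statement is the Claim_ definition above) =====
theorem adv_solve_three_partition_spec : Claim_equal_adv_solve_three_partition := by
  intro sizes bound _
  unfold Spec_adv_solve_three_partition adv_solve_three_partition adv_solve_three_partition_alt
  rw [pvGoB_eq_resume sizes bound (sizes.length / 3) _ [] 0 _ _
    (by simp) (by omega) (by simp) (pvFuel_init _ _)]
  rw [pvResume_step]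
  simp only [List.length_nil]
  rw [← pvBtA_drop sizes bound (sizes.length / 3) 0 _ _ (by omega), List.drop_zero]
  cases pvBtA bound (sizes.length / 3) sizes (List.replicate (sizes.length / 3) 0)
      (List.replicate (sizes.length / 3) 0) with
  | some res => simp [pvPathOf]
  | none => simp
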